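-- pv_equiv track=rewrite | github.com/wasikatcern/RMM-C20 | plot_rmm.py | build_full_labels
-- ===== SOURCE A (Python) =====
-- def build_full_labels(m):
--     """
--     Build per-index labels:
--       0          : MET
--       1..10      : j1..j10
--       11..20     : b1..b10
--       21..30     : μ1..μ10
--       31..40     : e1..e10
--       41..50     : γ1..γ10
--     Assumes m = 51 (or at least 1 + 5*10).
--     """
--     labels = []
--     labels.append("MET")
--
--     maxN = (m - 1) // 5  # usually 10
--
--     # Jets j1..jN
--     for i in range(maxN):
--         labels.append(f"J{i+1}")
--
--     # b-jets b1..bN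
--     for i in range(maxN):
--         labels.append(f"b{i+1}")
--
--     # muons μ1..μN
--     for i in range(maxN):
--         labels.append(f"μ{i+1}")
--
--     # electrons e1..eN
--     for i in range(maxN):
--         labels.append(f"e{i+1}")
--
--     # photons γ1..γN
--     for i in range(maxN):
--         labels.append(f"γ{i+1}")
--
--     # If m is slightly different, truncate/pad
--     if len(labels) > m:
--         labels = labels[:m]
--     elif len(labels) < m:
--         labels.extend([f"x{i}" for i in range(len(labels), m)])
--
--     return labels
-- ===== SOURCE B (Python) =====
-- def _label(maxN, i):
--     if i == 0:
--         return "MET"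
--     idx = i - 1
--     if idx < 5 * maxN:
--         return ("J", "b", "\u03bc", "e", "\u03b3")[idx // maxN] + str(idx % maxN + 1)
--     return f"x{i}"
--
--
-- def build_full_labels(m):
--     maxN = (m - 1) // 5
--     return [_label(maxN, i) for i in range(m)]
-- ===== Notes on version B (the rewrite author's own statement) =====
-- stated objective: alternative
-- what changed: Replaces A's five sequential block-building loops plus a truncate/pad fixup by a single index-driven pass over range(m) that computes each label directly from its index via divmod by maxN.
import Mathlib
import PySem

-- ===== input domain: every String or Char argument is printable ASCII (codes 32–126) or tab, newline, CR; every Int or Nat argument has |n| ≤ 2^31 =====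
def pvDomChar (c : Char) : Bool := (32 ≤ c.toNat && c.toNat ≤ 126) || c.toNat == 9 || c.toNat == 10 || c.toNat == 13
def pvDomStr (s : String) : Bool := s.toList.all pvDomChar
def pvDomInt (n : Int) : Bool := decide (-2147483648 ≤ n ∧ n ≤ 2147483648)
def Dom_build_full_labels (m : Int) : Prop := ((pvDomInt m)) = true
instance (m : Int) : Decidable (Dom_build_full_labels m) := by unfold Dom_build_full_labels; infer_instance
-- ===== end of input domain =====

-- B replaces A's five block loops + truncate/pad fixup by one index-driven pass computing each label from its index (alternative decomposition, same cost).


-- ===== PORT A =====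
def build_full_labels (m : Int) : List String :=
  let labels : List String := ["MET"]
  let maxN : Int := PySem.Int.floordiv (m - 1) 5
  let labels := labels ++ (PySem.List.pyRange 0 maxN 1).map (fun i => "J" ++ PySem.Int.toStr (i + 1))
  let labels := labels ++ (PySem.List.pyRange 0 maxN 1).map (fun i => "b" ++ PySem.Int.toStr (i + 1))
  let labels := labels ++ (PySem.List.pyRange 0 maxN 1).map (fun i => "μ" ++ PySem.Int.toStr (i + 1))
  let labels := labels ++ (PySem.List.pyRange 0 maxN 1).map (fun i => "e" ++ PySem.Int.toStr (i + 1))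
  let labels := labels ++ (PySem.List.pyRange 0 maxN 1).map (fun i => "γ" ++ PySem.Int.toStr (i + 1))
  if PySem.List.len labels > m then PySem.List.slice labels none (some m)
  else if PySem.List.len labels < m then
    labels ++ (PySem.List.pyRange (PySem.List.len labels) m 1).map (fun i => "x" ++ PySem.Int.toStr i)
  else labels

-- ===== PORT B =====
-- helper _label of Source B
def pvLabel (maxN : Int) (i : Int) : String :=
  if i = 0 then "MET"
  else
    let idx := i - 1
    if idx < 5 * maxN then
      PySem.List.pyGetD ["J", "b", "μ", "e", "γ"] (PySem.Int.floordiv idx maxN) ""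
        ++ PySem.Int.toStr (PySem.Int.mod idx maxN + 1)
    else "x" ++ PySem.Int.toStr i

def build_full_labels_alt (m : Int) : List String :=
  let maxN : Int := PySem.Int.floordiv (m - 1) 5
  (PySem.List.pyRange 0 m 1).map (pvLabel maxN)

-- ===== PRECONDITION & SPEC =====
def Spec_build_full_labels (m : Int) (out : List String) : Prop := out = build_full_labels_alt m
instance (m : Int) (out : List String) : Decidable (Spec_build_full_labels m out) := by unfold Spec_build_full_labels; infer_instance

-- ===== CLAIM (what is proved, stated in full; the proofs are below) =====
def Claim_equal_build_full_labels : Prop := ∀ (m : Int), Dom_build_full_labels m → Spec_build_full_labels m (build_full_labels m)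

-- ===== LEMMAS AND PROOFS =====

-- one block: B's labels on indices 1+k*N … 1+k*N+N-1 are exactly A's k-th block
lemma pvBlock (N k : Int) (hN : 0 ≤ N) (hk : 0 ≤ k) (hk4 : k < 5) (p : String)
    (hget : PySem.List.pyGetD ["J", "b", "μ", "e", "γ"] k "" = p) :
    (PySem.List.pyRange (1 + k * N) (1 + k * N + N) 1).map (pvLabel N)
      = (PySem.List.pyRange 0 N 1).map (fun i => p ++ PySem.Int.toStr (i + 1)) := by
  rw [PySem.List.pyRange_one, PySem.List.pyRange_one]
  have hN1 : (1 + k * N + N - (1 + k * N)).toNat = (N - 0).toNat := by omega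
  rw [hN1, List.map_map, List.map_map]
  apply List.map_congr_left
  intro j hj
  have hjN : (j : Int) < N := by
    have := List.mem_range.mp hj; omega
  have hkN : 0 ≤ k * N := mul_nonneg hk hN
  have hNpos : 0 < N := by omega
  simp only [Function.comp]
  have hi0 : ¬ (1 + k * N + (j : Int) = 0) := by omega
  have hlt : 1 + k * N + (j : Int) - 1 < 5 * N := by nlinarith
  have hfd : PySem.Int.floordiv (1 + k * N + (j : Int) - 1) N = k := by
    rw [PySem.Int.floordiv_eq_iff_of_pos hNpos]
    constructor <;> nlinarith
  have hmd : PySem.Int.mod (1 + k * N + (j : Int) - 1) N = j := by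
    have h := PySem.Int.floordiv_mul_add_mod (1 + k * N + (j : Int) - 1) N
    rw [hfd] at h; omega
  simp only [pvLabel, if_neg hi0, if_pos hlt, hfd, hmd, hget]
  congr 2
  omega

-- B's labels on indices 0 … 5N are "MET" followed by A's five blocks
lemma pvHead (N : Int) (hN : 0 ≤ N) :
    (PySem.List.pyRange 0 (1 + 5 * N) 1).map (pvLabel N)
      = ["MET"]
        ++ (PySem.List.pyRange 0 N 1).map (fun i => "J" ++ PySem.Int.toStr (i + 1))
        ++ (PySem.List.pyRange 0 N 1).map (fun i => "b" ++ PySem.Int.toStr (i + 1))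
        ++ (PySem.List.pyRange 0 N 1).map (fun i => "μ" ++ PySem.Int.toStr (i + 1))
        ++ (PySem.List.pyRange 0 N 1).map (fun i => "e" ++ PySem.Int.toStr (i + 1))
        ++ (PySem.List.pyRange 0 N 1).map (fun i => "γ" ++ PySem.Int.toStr (i + 1)) := by
  have split : PySem.List.pyRange 1 (1 + 5 * N) 1
      = PySem.List.pyRange (1 + 0 * N) (1 + 0 * N + N) 1
        ++ PySem.List.pyRange (1 + 1 * N) (1 + 1 * N + N) 1
        ++ PySem.List.pyRange (1 + 2 * N) (1 + 2 * N + N) 1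
        ++ PySem.List.pyRange (1 + 3 * N) (1 + 3 * N + N) 1
        ++ PySem.List.pyRange (1 + 4 * N) (1 + 4 * N + N) 1 := by
    rw [PySem.List.pyRange_one_append 1 (1 + 1 * N) (1 + 5 * N) (by omega) (by omega),
        PySem.List.pyRange_one_append (1 + 1 * N) (1 + 2 * N) (1 + 5 * N) (by omega) (by omega),
        PySem.List.pyRange_one_append (1 + 2 * N) (1 + 3 * N) (1 + 5 * N) (by omega) (by omega),
        PySem.List.pyRange_one_append (1 + 3 * N) (1 + 4 * N) (1 + 5 * N) (by omega) (by omega)]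
    have h0 : PySem.List.pyRange 1 (1 + 1 * N) 1 = PySem.List.pyRange (1 + 0 * N) (1 + 0 * N + N) 1 := by
      congr 1 <;> ring
    have h1 : PySem.List.pyRange (1 + 1 * N) (1 + 2 * N) 1 = PySem.List.pyRange (1 + 1 * N) (1 + 1 * N + N) 1 := by
      congr 1; ring
    have h2 : PySem.List.pyRange (1 + 2 * N) (1 + 3 * N) 1 = PySem.List.pyRange (1 + 2 * N) (1 + 2 * N + N) 1 := by
      congr 1; ring
    have h3 : PySem.List.pyRange (1 + 3 * N) (1 + 4 * N) 1 = PySem.List.pyRange (1 + 3 * N) (1 + 3 * N + N) 1 := by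
      congr 1; ring
    have h4 : PySem.List.pyRange (1 + 4 * N) (1 + 5 * N) 1 = PySem.List.pyRange (1 + 4 * N) (1 + 4 * N + N) 1 := by
      congr 1; ring
    rw [h0, h1, h2, h3, h4]; simp [List.append_assoc]
  rw [PySem.List.pyRange_one_cons (by omega : (0 : Int) < 1 + 5 * N)]
  have hz : pvLabel N 0 = "MET" := by simp [pvLabel]
  simp only [List.map_cons, hz]
  have h01 : (0 : Int) + 1 = 1 := by norm_num
  rw [h01, split]
  simp only [List.map_append]
  rw [pvBlock N 0 hN (by norm_num) (by norm_num) "J" (by rfl),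
      pvBlock N 1 hN (by norm_num) (by norm_num) "b" (by rfl),
      pvBlock N 2 hN (by norm_num) (by norm_num) "μ" (by rfl),
      pvBlock N 3 hN (by norm_num) (by norm_num) "e" (by rfl),
      pvBlock N 4 hN (by norm_num) (by norm_num) "γ" (by rfl)]
  simp [List.append_assoc]

-- B's labels past index 5N are the pad labels x{i}
lemma pvTail (N a b : Int) (hN : 0 ≤ N) (ha : 1 + 5 * N ≤ a) :
    (PySem.List.pyRange a b 1).map (pvLabel N)
      = (PySem.List.pyRange a b 1).map (fun i => "x" ++ PySem.Int.toStr i) := by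
  apply List.map_congr_left
  intro i hi
  have hmem := PySem.List.mem_pyRange_one.mp hi
  have hi0 : ¬ (i = 0) := by omega
  have hlt : ¬ (i - 1 < 5 * N) := by omega
  simp only [pvLabel, if_neg hi0, if_neg hlt]

-- length of A's labels list before the truncate/pad step
lemma pvLen (N : Int) (hN : 0 ≤ N) :
    PySem.List.len
      (["MET"]
        ++ (PySem.List.pyRange 0 N 1).map (fun i => "J" ++ PySem.Int.toStr (i + 1))
        ++ (PySem.List.pyRange 0 N 1).map (fun i => "b" ++ PySem.Int.toStr (i + 1))
        ++ (PySem.List.pyRange 0 N 1).map (fun i => "μ" ++ PySem.Int.toStr (i + 1))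
        ++ (PySem.List.pyRange 0 N 1).map (fun i => "e" ++ PySem.Int.toStr (i + 1))
        ++ (PySem.List.pyRange 0 N 1).map (fun i => "γ" ++ PySem.Int.toStr (i + 1)))
      = 1 + 5 * N := by
  simp [PySem.List.len_eq, PySem.List.length_pyRange_one]
  omega

-- ===== VERDICT (by name: the statement is the Claim_ definition above) =====
theorem build_full_labels_spec : Claim_equal_build_full_labels := by
  intro m _
  show build_full_labels m = build_full_labels_alt m
  simp only [build_full_labels, build_full_labels_alt]
  set N := PySem.Int.floordiv (m - 1) 5 with hNdef
  have hdm := PySem.Int.floordiv_mul_add_mod (m - 1) 5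
  have hm0 := PySem.Int.mod_nonneg (m - 1) (by norm_num : (0:Int) < 5)
  have hm5 := PySem.Int.mod_lt (m - 1) (by norm_num : (0:Int) < 5)
  rw [← hNdef] at hdm
  by_cases hm : m ≤ 0
  · -- m ≤ 0: A slices ["MET"] down to [], B's range is empty
    have hNneg : N < 0 := by omega
    rw [PySem.List.pyRange_one_eq_nil (le_of_lt hNneg), PySem.List.pyRange_one_eq_nil hm]
    simp only [List.map_nil, List.append_nil]
    have hlen1 : PySem.List.len (["MET"] : List String) = 1 := by simp [PySem.List.len_eq]
    rw [hlen1, if_pos (by omega : (1:Int) > m)]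
    rcases eq_or_lt_of_le hm with heq | hlt
    · rw [heq, PySem.List.slice_to _ (le_refl 0)]
      simp
    · have hk : m = -(((-m).toNat : Nat) : Int) := by omega
      rw [hk, PySem.List.slice_to_neg_natCast _ _ (by omega)]
      have : (["MET"] : List String).length - (-m).toNat = 0 := by
        simp [List.length]; omega
      rw [this]; simp
  · have hN : 0 ≤ N := by omega
    have hlen : 1 + 5 * N ≤ m := by omega
    rw [PySem.List.pyRange_one_append 0 (1 + 5 * N) m (by omega) hlen, List.map_append,
        pvHead N hN, pvTail N (1 + 5 * N) m hN (le_refl _), pvLen N hN,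
        if_neg (by omega : ¬ (1 + 5 * N > m))]
    rcases eq_or_lt_of_le hlen with heq | hlt
    · rw [if_neg (by omega : ¬ (1 + 5 * N < m)), PySem.List.pyRange_one_eq_nil (by omega : m ≤ 1 + 5 * N)]
      simp
    · rw [if_pos hlt]
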